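-- pv_equiv track=rewrite | github.com/ayhanagirgol/mission-control | skills/kredi-faiz-tr/scripts/kredi_hesapla.py | en_yakin_vade
-- ===== SOURCE A (Python) =====
-- def en_yakin_vade(vade_dict: dict, vade: int) -> int:
--     """Verilen vadeye en yakın mevcut vadeyi döndür."""
--     vadeler = sorted(vade_dict.keys())
--     if vade in vadeler:
--         return vade
--     # Üste yuvarla, yoksa alta
--     for v in vadeler:
--         if v >= vade:
--             return v
--     return vadeler[-1]
-- ===== SOURCE B (Python) =====
-- def en_yakin_vade(vade_dict: dict, vade: int) -> int:
--     """Verilen vadeye en yakın mevcut vadeyi döndür."""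
--     candidates = [v for v in vade_dict if v >= vade]
--     if candidates:
--         return min(candidates)
--     return sorted(vade_dict)[-1]
-- ===== Notes on version B (the rewrite author's own statement) =====
-- stated objective: simpler
-- what changed: Replaces the sort + membership test + linear scan with a single filter of keys >= vade and min() over it, sorting only for the fallback largest key; the main path avoids sorting entirely.
import Mathlib
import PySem

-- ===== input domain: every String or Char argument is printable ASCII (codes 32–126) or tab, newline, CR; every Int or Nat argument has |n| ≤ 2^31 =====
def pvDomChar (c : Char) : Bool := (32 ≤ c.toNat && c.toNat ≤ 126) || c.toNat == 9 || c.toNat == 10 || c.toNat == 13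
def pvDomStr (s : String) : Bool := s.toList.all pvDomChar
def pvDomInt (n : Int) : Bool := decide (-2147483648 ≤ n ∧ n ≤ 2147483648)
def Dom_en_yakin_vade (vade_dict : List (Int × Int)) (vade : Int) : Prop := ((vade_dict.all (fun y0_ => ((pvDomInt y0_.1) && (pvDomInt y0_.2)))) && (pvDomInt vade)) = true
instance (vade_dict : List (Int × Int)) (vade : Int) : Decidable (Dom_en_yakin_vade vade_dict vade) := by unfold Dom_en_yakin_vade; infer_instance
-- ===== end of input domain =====

-- B replaces A's sort + membership test + scan by one filter of the keys ≥ vade and min() over it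
-- (fallback: the largest key); objective: simpler.

-- ===== PORT A =====
def en_yakin_vade (vade_dict : List (Int × Int)) (vade : Int) : Int :=
  let vadeler := PySem.List.sorted ((PySem.Dict.ofList vade_dict).keys) (fun x => x) false
  if vade ∈ vadeler then vade
  else
    match vadeler.find? (fun v => decide (vade ≤ v)) with
    | some v => v
    | none => (PySem.List.pyGet? vadeler (-1)).getD 0   -- vadeler[-1]; none (IndexError) only on empty dict, excluded by Pre_

-- ===== PORT B =====
def en_yakin_vade_alt (vade_dict : List (Int × Int)) (vade : Int) : Int :=
  let candidates := ((PySem.Dict.ofList vade_dict).keys).filter (fun v => decide (vade ≤ v))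
  match PySem.List.min? candidates (fun x => x) with
  | some m => m
  | none => (PySem.List.pyGet? (PySem.List.sorted ((PySem.Dict.ofList vade_dict).keys) (fun x => x) false) (-1)).getD 0

-- ===== PRECONDITION & SPEC =====
-- Pre_ excludes the empty dict, on which both A and B raise IndexError (vadeler[-1] / sorted(vade_dict)[-1]).
def Pre_en_yakin_vade (vade_dict : List (Int × Int)) (vade : Int) : Prop := vade_dict ≠ []
instance (vade_dict : List (Int × Int)) (vade : Int) : Decidable (Pre_en_yakin_vade vade_dict vade) := by unfold Pre_en_yakin_vade; infer_instance
def pvWitness_en_yakin_vade : (List (Int × Int)) × Int := ([(3, 0), (6, 0)], 4)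

def Spec_en_yakin_vade (vade_dict : List (Int × Int)) (vade : Int) (out : Int) : Prop := out = en_yakin_vade_alt vade_dict vade
instance (vade_dict : List (Int × Int)) (vade : Int) (out : Int) : Decidable (Spec_en_yakin_vade vade_dict vade out) := by unfold Spec_en_yakin_vade; infer_instance

-- ===== CLAIM (what is proved, stated in full; the proofs are below) =====
def Claim_equal_en_yakin_vade : Prop := ∀ (vade_dict : List (Int × Int)) (vade : Int), Dom_en_yakin_vade vade_dict vade → Pre_en_yakin_vade vade_dict vade → Spec_en_yakin_vade vade_dict vade (en_yakin_vade vade_dict vade)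

-- ===== LEMMAS AND PROOFS =====

-- In a ≤-sorted list, find? p returns a lower bound of all elements satisfying p.
theorem find?_sorted_isMin (p : Int → Bool) :
    ∀ (s : List Int), s.Pairwise (fun a b => a ≤ b) →
      ∀ f, s.find? p = some f → ∀ y ∈ s, p y = true → f ≤ y := by
  intro s hs
  induction s with
  | nil => intro f hf; simp at hf
  | cons x t ih =>
    intro f hf y hy hpy
    rw [List.pairwise_cons] at hs
    by_cases hx : p x = true
    · rw [List.find?_cons_of_pos hx] at hf
      cases hf
      rcases List.mem_cons.mp hy with hy | hy
      · omega
      · exact hs.1 y hy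
    · rw [List.find?_cons_of_neg hx] at hf
      rcases List.mem_cons.mp hy with hy | hy
      · subst hy; simp [hpy] at hx
      · exact ih hs.2 f hf y hy hpy

theorem en_yakin_vade_eq (vade_dict : List (Int × Int)) (vade : Int) :
    en_yakin_vade vade_dict vade = en_yakin_vade_alt vade_dict vade := by
  unfold en_yakin_vade en_yakin_vade_alt
  set ks := (PySem.Dict.ofList vade_dict).keys with hks
  set p : Int → Bool := fun v => decide (vade ≤ v) with hp
  set s := PySem.List.sorted ks (fun x => x) false with hs
  have hperm : s.Perm ks := PySem.List.sorted_perm ks (fun x => x) false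
  have hpair : s.Pairwise (fun a b => a ≤ b) := PySem.List.sorted_pairwise ks (fun x => x)
  simp only []
  cases hmin : PySem.List.min? (ks.filter p) (fun x => x) with
  | none =>
    -- candidates empty: no key ≥ vade, so vade ∉ s and find? fails; both take the fallback
    rw [PySem.List.min?_eq_none_iff] at hmin
    have hno : ∀ y ∈ ks, p y ≠ true := by
      intro y hy hpy
      have : y ∈ ks.filter p := List.mem_filter.mpr ⟨hy, hpy⟩
      simp [hmin] at this
    have hnv : vade ∉ s := by
      intro hv
      exact hno vade (hperm.mem_iff.mp hv) (by simp [hp])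
    have hfind : s.find? p = none := by
      rw [List.find?_eq_none]
      intro y hy hpy
      exact hno y (hperm.mem_iff.mp hy) hpy
    simp [hnv, hfind]
  | some m =>
    have hm_mem : m ∈ ks.filter p := PySem.List.min?_mem hmin
    have hm_ks : m ∈ ks := (List.mem_filter.mp hm_mem).1
    have hm_p : vade ≤ m := by have := (List.mem_filter.mp hm_mem).2; simpa [hp] using this
    have hm_min : ∀ y ∈ ks, p y = true → m ≤ y := by
      intro y hy hpy
      exact PySem.List.min?_isMin hmin y (List.mem_filter.mpr ⟨hy, hpy⟩)
    by_cases hv : vade ∈ s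
    · -- vade itself is a candidate, so the minimum candidate is vade
      have h1 : m ≤ vade := hm_min vade (hperm.mem_iff.mp hv) (by simp [hp])
      have : m = vade := le_antisymm h1 hm_p
      simp [hv, this]
    · -- find? succeeds and returns exactly the minimum candidate
      have hex : ∃ y ∈ s, p y = true := ⟨m, hperm.mem_iff.mpr hm_ks, by simp [hp, hm_p]⟩
      have hsome : (s.find? p).isSome := List.find?_isSome.mpr hex
      cases hfind : s.find? p with
      | none => rw [hfind] at hsome; simp at hsome
      | some f =>
        have hf_mem : f ∈ s := List.mem_of_find?_eq_some hfind
        have hf_p : p f = true := List.find?_some hfind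
        have h1 : m ≤ f := hm_min f (hperm.mem_iff.mp hf_mem) hf_p
        have h2 : f ≤ m := find?_sorted_isMin p s hpair f hfind m (hperm.mem_iff.mpr hm_ks) (by simp [hp, hm_p])
        simp [hv, hfind, le_antisymm h2 h1]

-- ===== VERDICT (by name: the statement is the Claim_ definition above) =====
theorem en_yakin_vade_spec : Claim_equal_en_yakin_vade := by
  intro vade_dict vade _ _
  unfold Spec_en_yakin_vade
  exact en_yakin_vade_eq vade_dict vade
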